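-- pv_equiv track=rewrite | github.com/craigrallen/ha-habitus | habitus/habitus/scene_detector.py | _extract_room
-- ===== SOURCE A (Python) =====
-- ROOM_KEYWORDS = [
--     "living_room", "living room", "lounge", "family_room",
--     "bedroom", "master_bedroom", "guest_bedroom", "kids_room",
--     "kitchen", "galley",
--     "bathroom", "bath", "shower", "ensuite",
--     "hallway", "hall", "corridor", "entry", "foyer", "entrance",
--     "office", "study", "den", "workspace",
--     "dining", "dining_room",
--     "garage", "workshop",
--     "garden", "patio", "deck", "terrace", "balcony",
--     "laundry", "utility",
--     "nursery", "playroom",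
--     # Boat-specific
--     "wheelhouse", "engine_room", "salon", "saloon", "cabin", "cockpit",
--     "foredeck", "aft_deck", "anchor", "helm",
-- ]
--
-- def _extract_room(entity_id: str) -> str | None:
--     """Extract room name from an entity ID using keyword matching.
--
--     Checks the entity name part (after the dot) for known room keywords.
--     Returns the matched room name in title case, or None.
--     """
--     name_part = entity_id.split(".")[-1].lower()
--
--     # Try longest match first (e.g. "living_room" before "room")
--     sorted_keywords = sorted(ROOM_KEYWORDS, key=len, reverse=True)
--     for kw in sorted_keywords:
--         kw_underscore = kw.replace(" ", "_")
--         if kw_underscore in name_part or kw in name_part: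
--             return kw.replace("_", " ").title()
--     return None
-- ===== SOURCE B (Python) =====
-- ROOM_KEYWORDS = [
--     "living_room", "living room", "lounge", "family_room",
--     "bedroom", "master_bedroom", "guest_bedroom", "kids_room",
--     "kitchen", "galley",
--     "bathroom", "bath", "shower", "ensuite",
--     "hallway", "hall", "corridor", "entry", "foyer", "entrance",
--     "office", "study", "den", "workspace",
--     "dining", "dining_room",
--     "garage", "workshop",
--     "garden", "patio", "deck", "terrace", "balcony",
--     "laundry", "utility",
--     "nursery", "playroom",
--     # Boat-specific
--     "wheelhouse", "engine_room", "salon", "saloon", "cabin", "cockpit",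
--     "foredeck", "aft_deck", "anchor", "helm",
-- ]
--
--
-- def _extract_room(entity_id: str) -> str | None:
--     """Single pass over ROOM_KEYWORDS: keep the best match by (-len, index)."""
--     name_part = entity_id.split(".")[-1].lower()
--     best = None
--     for idx, kw in enumerate(ROOM_KEYWORDS):
--         if kw.replace(" ", "_") in name_part or kw in name_part:
--             key = (-len(kw), idx)
--             if best is None or key < best[0]:
--                 best = (key, kw)
--     if best is None:
--         return None
--     return best[1].replace("_", " ").title()
-- ===== Notes on version B (the rewrite author's own statement) =====
-- stated objective: alternative
-- what changed: B drops A's per-call stable length sort of ROOM_KEYWORDS and instead makes a single pass over the list in original order, keeping the best match under the (-len, index) key, which reproduces A's longest-match-first, earliest-on-ties choice.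
import Mathlib
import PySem

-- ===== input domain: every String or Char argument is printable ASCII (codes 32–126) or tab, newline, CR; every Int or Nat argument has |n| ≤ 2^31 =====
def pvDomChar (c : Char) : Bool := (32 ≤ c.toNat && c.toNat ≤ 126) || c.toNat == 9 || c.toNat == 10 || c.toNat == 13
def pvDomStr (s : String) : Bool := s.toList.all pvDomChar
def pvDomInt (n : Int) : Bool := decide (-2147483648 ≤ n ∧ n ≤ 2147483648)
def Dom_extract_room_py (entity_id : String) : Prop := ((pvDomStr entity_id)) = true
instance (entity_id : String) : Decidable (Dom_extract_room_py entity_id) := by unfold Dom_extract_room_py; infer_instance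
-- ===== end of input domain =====

-- B drops A's per-call length sort and instead selects, in one pass over ROOM_KEYWORDS,
-- the matching keyword with minimal (-length, index) key (objective: alternative decomposition, same result).

-- ===== PORT A =====
def ROOM_KEYWORDS : List String := [
  "living_room",
  "living room",
  "lounge",
  "family_room",
  "bedroom",
  "master_bedroom",
  "guest_bedroom",
  "kids_room",
  "kitchen",
  "galley",
  "bathroom",
  "bath",
  "shower",
  "ensuite",
  "hallway",
  "hall",
  "corridor",
  "entry",
  "foyer",
  "entrance",
  "office",
  "study",
  "den",
  "workspace",
  "dining",
  "dining_room",
  "garage",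
  "workshop",
  "garden",
  "patio",
  "deck",
  "terrace",
  "balcony",
  "laundry",
  "utility",
  "nursery",
  "playroom",
  "wheelhouse",
  "engine_room",
  "salon",
  "saloon",
  "cabin",
  "cockpit",
  "foredeck",
  "aft_deck",
  "anchor",
  "helm"
]

-- exact port of Python str.title() on the ASCII domain (a char is "cased" iff it is an ASCII letter)
def pyTitleChars : List Char → Bool → List Char
  | [], _ => []
  | c :: rest, prevAlpha =>
    (if PySem.Chars.isalpha c then
        (if prevAlpha then PySem.Chars.lowerChar c else PySem.Chars.upperChar c)
      else c) :: pyTitleChars rest (PySem.Chars.isalpha c)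

def pyTitle (s : String) : String := String.ofList (pyTitleChars s.toList false)

def findRoomLoop (name_part : String) : List String → Option String
  | [] => none
  | kw :: rest =>
    if PySem.Str.isIn (PySem.Str.replace kw " " "_") name_part || PySem.Str.isIn kw name_part then
      some (pyTitle (PySem.Str.replace kw "_" " "))
    else findRoomLoop name_part rest

def extract_room_py (entity_id : String) : Option String :=
  let name_part := PySem.Str.lower ((PySem.List.pyGet? ((PySem.Str.split? entity_id ".").getD []) (-1)).getD "")
  let sorted_keywords := PySem.List.sorted ROOM_KEYWORDS (fun kw => (PySem.Str.len kw : Int)) true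
  findRoomLoop name_part sorted_keywords

-- ===== PORT B =====
-- Python tuple comparison on the (Int, Int) key, exact for int pairs
def roomKeyLT (a b : Int × Int) : Bool :=
  a.1 < b.1 || (a.1 == b.1 && a.2 < b.2)

def roomBestStep (name_part : String) (best : Option ((Int × Int) × String))
    (p : Int × String) : Option ((Int × Int) × String) :=
  if PySem.Str.isIn (PySem.Str.replace p.2 " " "_") name_part || PySem.Str.isIn p.2 name_part then
    let key : Int × Int := (-(PySem.Str.len p.2 : Int), p.1)
    match best with
    | none => some (key, p.2)
    | some b => if roomKeyLT key b.1 then some (key, p.2) else best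
  else best

def extract_room_py_alt (entity_id : String) : Option String :=
  let name_part := PySem.Str.lower ((PySem.List.pyGet? ((PySem.Str.split? entity_id ".").getD []) (-1)).getD "")
  match (PySem.List.enumerate ROOM_KEYWORDS).foldl (roomBestStep name_part) none with
  | none => none
  | some b => some (pyTitle (PySem.Str.replace b.2 "_" " "))

-- ===== PRECONDITION & SPEC =====
def Spec_extract_room_py (entity_id : String) (out : Option String) : Prop := out = extract_room_py_alt entity_id
instance (entity_id : String) (out : Option String) : Decidable (Spec_extract_room_py entity_id out) := by unfold Spec_extract_room_py; infer_instance

-- ===== CLAIM (what is proved, stated in full; the proofs are below) =====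
def Claim_equal_extract_room_py : Prop := ∀ (entity_id : String), Dom_extract_room_py entity_id → Spec_extract_room_py entity_id (extract_room_py entity_id)

-- ===== LEMMAS AND PROOFS =====

-- the per-keyword match condition both programs test (definitionally what the ports inline)
def roomCond (np kw : String) : Bool :=
  PySem.Str.isIn (PySem.Str.replace kw " " "_") np || PySem.Str.isIn kw np

def roomFmt (kw : String) : String := pyTitle (PySem.Str.replace kw "_" " ")

-- B's step over pre-keyed pairs
def keyedStep (c : String → Bool) (best : Option ((Int × Int) × String))
    (p : (Int × Int) × String) : Option ((Int × Int) × String) :=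
  if c p.2 then
    match best with
    | none => some p
    | some b => if roomKeyLT p.1 b.1 then some p else best
  else best

def toKeyed (p : Int × String) : (Int × Int) × String :=
  ((-(PySem.Str.len p.2 : Int), p.1), p.2)

-- the stable length-descending sort of ROOM_KEYWORDS, enumerated with (-len, index) keys
def psLit : List ((Int × Int) × String) := [
  ((-14, 5), "master_bedroom"),
  ((-13, 6), "guest_bedroom"),
  ((-11, 0), "living_room"),
  ((-11, 1), "living room"),
  ((-11, 3), "family_room"),
  ((-11, 25), "dining_room"),
  ((-11, 38), "engine_room"),
  ((-10, 37), "wheelhouse"),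
  ((-9, 7), "kids_room"),
  ((-9, 23), "workspace"),
  ((-8, 10), "bathroom"),
  ((-8, 16), "corridor"),
  ((-8, 19), "entrance"),
  ((-8, 27), "workshop"),
  ((-8, 36), "playroom"),
  ((-8, 43), "foredeck"),
  ((-8, 44), "aft_deck"),
  ((-7, 4), "bedroom"),
  ((-7, 8), "kitchen"),
  ((-7, 13), "ensuite"),
  ((-7, 14), "hallway"),
  ((-7, 31), "terrace"),
  ((-7, 32), "balcony"),
  ((-7, 33), "laundry"),
  ((-7, 34), "utility"),
  ((-7, 35), "nursery"),
  ((-7, 42), "cockpit"),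
  ((-6, 2), "lounge"),
  ((-6, 9), "galley"),
  ((-6, 12), "shower"),
  ((-6, 20), "office"),
  ((-6, 24), "dining"),
  ((-6, 26), "garage"),
  ((-6, 28), "garden"),
  ((-6, 40), "saloon"),
  ((-6, 45), "anchor"),
  ((-5, 17), "entry"),
  ((-5, 18), "foyer"),
  ((-5, 21), "study"),
  ((-5, 29), "patio"),
  ((-5, 39), "salon"),
  ((-5, 41), "cabin"),
  ((-4, 11), "bath"),
  ((-4, 15), "hall"),
  ((-4, 30), "deck"),
  ((-4, 46), "helm"),
  ((-3, 22), "den")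
]

-- what an Option result being "the minimum match of l" means
def RoomMin (c : String → Bool) (l : List ((Int × Int) × String)) :
    Option ((Int × Int) × String) → Prop
  | none => ∀ p ∈ l, c p.2 = false
  | some b => b ∈ l ∧ c b.2 = true ∧ ∀ p ∈ l, c p.2 = true → roomKeyLT p.1 b.1 = false

theorem roomKeyLT_iff (a b : Int × Int) :
    roomKeyLT a b = true ↔ (a.1 < b.1 ∨ (a.1 = b.1 ∧ a.2 < b.2)) := by
  simp [roomKeyLT]

theorem roomKeyLT_irrefl (a : Int × Int) : roomKeyLT a a = false := by
  simp [roomKeyLT]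

theorem roomKeyLT_asymm {a b : Int × Int} (h : roomKeyLT a b = true) :
    roomKeyLT b a = false := by
  rw [roomKeyLT_iff] at h
  rw [← Bool.not_eq_true, roomKeyLT_iff]
  omega

theorem roomKeyLT_trans {a b c : Int × Int} (h1 : roomKeyLT a b = true)
    (h2 : roomKeyLT b c = true) : roomKeyLT a c = true := by
  rw [roomKeyLT_iff] at h1 h2 ⊢
  omega

theorem roomKeyLT_antisymm {a b : Int × Int} (h1 : roomKeyLT a b = false)
    (h2 : roomKeyLT b a = false) : a = b := by
  rw [← Bool.not_eq_true, roomKeyLT_iff] at h1 h2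
  have : a.1 = b.1 ∧ a.2 = b.2 := by omega
  exact Prod.ext this.1 this.2

theorem fold_isMin (c : String → Bool) (l : List ((Int × Int) × String)) :
    RoomMin c l (l.foldl (keyedStep c) none) := by
  induction l using List.reverseRecOn with
  | nil => intro p hp; simp at hp
  | append_singleton l p ih =>
    rw [List.foldl_append, List.foldl_cons, List.foldl_nil]
    rcases hr : l.foldl (keyedStep c) none with _ | b <;> rw [hr] at ih
    · by_cases hc : c p.2 = true
      · simp only [keyedStep, hc, if_true]
        refine ⟨by simp, hc, ?_⟩
        intro q hq hcq
        rcases List.mem_append.1 hq with hq | hq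
        · exact absurd hcq (by simp [ih q hq])
        · simp at hq; subst hq; exact roomKeyLT_irrefl _
      · simp only [keyedStep, hc]
        intro q hq
        rcases List.mem_append.1 hq with hq | hq
        · exact ih q hq
        · simp at hq; subst hq; simpa using hc
    · obtain ⟨hmem, hcb, hmin⟩ := ih
      by_cases hc : c p.2 = true
      · simp only [keyedStep, hc, if_true]
        by_cases hlt : roomKeyLT p.1 b.1 = true
        · simp only [hlt, if_true]
          refine ⟨by simp, hc, ?_⟩
          intro q hq hcq
          rcases List.mem_append.1 hq with hq | hq
          · have hqb := hmin q hq hcq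
            rw [← Bool.not_eq_true]
            intro hqp
            have := roomKeyLT_trans hqp hlt
            simp [this] at hqb
          · simp at hq; subst hq; exact roomKeyLT_irrefl _
        · simp only [hlt]
          refine ⟨List.mem_append.2 (Or.inl hmem), hcb, ?_⟩
          intro q hq hcq
          rcases List.mem_append.1 hq with hq | hq
          · exact hmin q hq hcq
          · simp at hq; subst hq; simpa using hlt
      · simp only [keyedStep, hc]
        refine ⟨List.mem_append.2 (Or.inl hmem), hcb, ?_⟩
        intro q hq hcq
        rcases List.mem_append.1 hq with hq | hq
        · exact hmin q hq hcq
        · simp at hq; subst hq; exact absurd hcq (by simp [hc])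

theorem find?_isMin (c : String → Bool) (l : List ((Int × Int) × String))
    (hp : l.Pairwise (fun a b => roomKeyLT a.1 b.1 = true)) :
    RoomMin c l (l.find? (fun p => c p.2)) := by
  induction l with
  | nil => intro p hp; simp at hp
  | cons p l ih =>
    rw [List.pairwise_cons] at hp
    obtain ⟨hhead, htail⟩ := hp
    by_cases hc : c p.2 = true
    · rw [List.find?_cons_of_pos (by simpa using hc)]
      refine ⟨List.mem_cons_self, hc, ?_⟩
      intro q hq hcq
      rcases List.mem_cons.1 hq with hq | hq
      · subst hq; exact roomKeyLT_irrefl _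
      · exact roomKeyLT_asymm (hhead q hq)
    · rw [List.find?_cons_of_neg (by simpa using hc)]
      rcases hr : l.find? (fun p => c p.2) with _ | b <;>
        have ihr := ih htail <;> rw [hr] at ihr <;> rw [hr]
      · intro q hq
        rcases List.mem_cons.1 hq with hq | hq
        · subst hq; simpa using hc
        · exact ihr q hq
      · obtain ⟨hmem, hcb, hmin⟩ := ihr
        refine ⟨List.mem_cons_of_mem _ hmem, hcb, ?_⟩
        intro q hq hcq
        rcases List.mem_cons.1 hq with hq | hq
        · subst hq; exact absurd hcq (by simp [hc])
        · exact hmin q hq hcq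

theorem isMin_unique (c : String → Bool) (l l' : List ((Int × Int) × String))
    (hm : ∀ p, p ∈ l ↔ p ∈ l')
    (hinj : ∀ p ∈ l, ∀ q ∈ l, p.1 = q.1 → p = q)
    {r r' : Option ((Int × Int) × String)}
    (h1 : RoomMin c l r) (h2 : RoomMin c l' r') : r = r' := by
  rcases r with _ | b <;> rcases r' with _ | b'
  · rfl
  · obtain ⟨hmem, hcb, _⟩ := h2
    exact absurd hcb (by simp [h1 b' ((hm b').2 hmem)])
  · obtain ⟨hmem, hcb, _⟩ := h1
    exact absurd hcb (by simp [h2 b ((hm b).1 hmem)])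
  · obtain ⟨hmem1, hcb1, hmin1⟩ := h1
    obtain ⟨hmem2, hcb2, hmin2⟩ := h2
    have hb'l : b' ∈ l := (hm b').2 hmem2
    have hbl' : b ∈ l' := (hm b).1 hmem1
    have e1 := hmin1 b' hb'l hcb2
    have e2 := hmin2 b hbl' hcb1
    have : b'.1 = b.1 := roomKeyLT_antisymm e1 e2
    exact congrArg some (hinj b hmem1 b' hb'l this.symm)

-- the A-side loop is find? followed by formatting
theorem findRoomLoop_eq (np : String) (l : List String) :
    findRoomLoop np l = (l.find? (fun kw => roomCond np kw)).map roomFmt := by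
  induction l with
  | nil => rfl
  | cons kw rest ih =>
    simp only [findRoomLoop]
    have hdef : (PySem.Str.isIn (PySem.Str.replace kw " " "_") np || PySem.Str.isIn kw np)
        = roomCond np kw := rfl
    rw [hdef]
    by_cases hc : roomCond np kw = true
    · rw [if_pos hc, List.find?_cons_of_pos (by simpa using hc)]
      rfl
    · rw [if_neg hc, List.find?_cons_of_neg (by simpa using hc)]
      exact ih

-- concrete facts about the literal lists, checked by the kernel
theorem psLit_map_snd :
    psLit.map (fun p => p.2)
      = PySem.List.sorted ROOM_KEYWORDS (fun kw => (PySem.Str.len kw : Int)) true := by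
  decide

theorem psLit_pairwise : psLit.Pairwise (fun a b => roomKeyLT a.1 b.1 = true) := by
  decide

theorem qs_perm : ((PySem.List.enumerate ROOM_KEYWORDS).map toKeyed).Perm psLit := by
  decide

theorem qs_inj : ∀ p ∈ (PySem.List.enumerate ROOM_KEYWORDS).map toKeyed,
    ∀ q ∈ (PySem.List.enumerate ROOM_KEYWORDS).map toKeyed, p.1 = q.1 → p = q := by
  decide

theorem fold_eq_keyed (np : String) :
    (PySem.List.enumerate ROOM_KEYWORDS).foldl (roomBestStep np) none
      = ((PySem.List.enumerate ROOM_KEYWORDS).map toKeyed).foldl (keyedStep (roomCond np)) none := by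
  rw [List.foldl_map]
  rfl

theorem core_eq (np : String) :
    (PySem.List.enumerate ROOM_KEYWORDS).foldl (roomBestStep np) none
      = psLit.find? (fun p => roomCond np p.2) := by
  rw [fold_eq_keyed]
  exact isMin_unique (roomCond np) _ psLit (fun p => qs_perm.mem_iff)
    qs_inj (fold_isMin _ _) (find?_isMin _ _ psLit_pairwise)

theorem comp_fmt :
    (roomFmt ∘ fun p : (Int × Int) × String => p.2)
      = (fun b : (Int × Int) × String => roomFmt b.2) := funext fun _ => rfl

theorem comp_cond (np : String) :
    ((fun kw => roomCond np kw) ∘ fun p : (Int × Int) × String => p.2)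
      = (fun p : (Int × Int) × String => roomCond np p.2) := funext fun _ => rfl

theorem match_eq_map (r : Option ((Int × Int) × String)) :
    (match r with
      | none => none
      | some b => some (pyTitle (PySem.Str.replace b.2 "_" " "))) = r.map (fun b => roomFmt b.2) := by
  cases r <;> rfl

-- ===== VERDICT (by name: the statement is the Claim_ definition above) =====
set_option maxHeartbeats 2000000 in
theorem extract_room_py_spec : Claim_equal_extract_room_py := by
  intro entity_id _
  show extract_room_py entity_id = extract_room_py_alt entity_id
  unfold extract_room_py extract_room_py_alt
  rw [findRoomLoop_eq, ← psLit_map_snd, List.find?_map, Option.map_map]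
  simp only []
  rw [match_eq_map, core_eq, comp_fmt, comp_cond]
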